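-- pv_equiv track=rewrite | github.com/hbilu/Python_Playground | Move_all_negative_elements_to_end.py | segregateElements
-- ===== SOURCE A (Python) =====
-- def segregateElements(arr, n):
--     pos = []
--     neg = []
--     for i in range(n):
--         if arr[i]<0:
--             neg.append(arr[i])
--         else:
--             pos.append(arr[i])
--     arr.clear()
--     arr.extend(pos+neg)
--     return arr
-- ===== SOURCE B (Python) =====
-- def segregateElements(arr, n):
--     arr[:] = sorted((arr[i] for i in range(n)), key=lambda x: x < 0)
--     return arr
-- ===== Notes on version B (the rewrite author's own statement) =====
-- stated objective: idiomatic
-- what changed: B replaces A's explicit two-list partition loop with a single stable sort keyed on (x < 0), relying on sort stability to keep non-negatives before negatives in original order.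
import Mathlib
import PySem

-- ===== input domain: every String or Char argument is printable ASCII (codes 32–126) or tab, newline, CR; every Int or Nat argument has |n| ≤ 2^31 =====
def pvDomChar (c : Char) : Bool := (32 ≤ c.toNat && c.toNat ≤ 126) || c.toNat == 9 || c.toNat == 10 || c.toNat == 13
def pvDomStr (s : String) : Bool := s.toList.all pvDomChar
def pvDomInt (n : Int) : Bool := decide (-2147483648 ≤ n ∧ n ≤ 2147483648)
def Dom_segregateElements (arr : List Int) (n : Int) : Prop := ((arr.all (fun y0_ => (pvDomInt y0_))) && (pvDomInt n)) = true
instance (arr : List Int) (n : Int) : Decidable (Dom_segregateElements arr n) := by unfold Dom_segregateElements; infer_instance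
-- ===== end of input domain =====

-- B rearranges via one stable sort keyed on (x < 0) instead of A's explicit two-list partition; same in-place mutation of arr.


-- ===== PORT A =====
def segregateElements (arr : List Int) (n : Int) : List Int :=
  let st := (PySem.List.pyRange 0 n 1).foldl
    (fun (pn : List Int × List Int) i =>
      if (PySem.List.pyGet? arr i).getD 0 < 0 then
        (pn.1, pn.2 ++ [(PySem.List.pyGet? arr i).getD 0])
      else
        (pn.1 ++ [(PySem.List.pyGet? arr i).getD 0], pn.2))
    ([], [])
  st.1 ++ st.2

-- ===== PORT B =====
def segregateElements_alt (arr : List Int) (n : Int) : List Int :=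
  PySem.List.sorted
    ((PySem.List.pyRange 0 n 1).map (fun i => (PySem.List.pyGet? arr i).getD 0))
    (fun x => decide (x < 0)) false

-- ===== PRECONDITION & SPEC =====
-- Pre_: A indexes arr[i] for i in range(n), so it raises IndexError exactly when n > len(arr).
def Pre_segregateElements (arr : List Int) (n : Int) : Prop := n ≤ (arr.length : Int)
instance (arr : List Int) (n : Int) : Decidable (Pre_segregateElements arr n) := by unfold Pre_segregateElements; infer_instance
def pvWitness_segregateElements : List Int × Int := ([3, -1, 0, -5, 2], 5)

def Spec_segregateElements (arr : List Int) (n : Int) (out : List Int) : Prop := out = segregateElements_alt arr n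
instance (arr : List Int) (n : Int) (out : List Int) : Decidable (Spec_segregateElements arr n out) := by unfold Spec_segregateElements; infer_instance

-- ===== CLAIM (what is proved, stated in full; the proofs are below) =====
def Claim_equal_segregateElements : Prop := ∀ (arr : List Int) (n : Int), Dom_segregateElements arr n → Pre_segregateElements arr n → Spec_segregateElements arr n (segregateElements arr n)

-- ===== LEMMAS AND PROOFS =====

-- inserting a non-negative element lands right after the non-negative prefix
theorem insertBy_pos (x : Int) (hx : decide (x < 0) = false) (pos neg : List Int)
    (hpos : ∀ y ∈ pos, decide (y < 0) = false)
    (hneg : ∀ y ∈ neg, decide (y < 0) = true) :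
    PySem.List.insertBy (fun a b : Int => decide (decide (a < 0) < decide (b < 0))) x (pos ++ neg)
      = pos ++ x :: neg := by
  induction pos with
  | nil =>
    cases neg with
    | nil => simp [PySem.List.insertBy]
    | cons y ys =>
      have hy := hneg y (by simp)
      simp [PySem.List.insertBy, hx, hy]
  | cons p ps ih =>
    have hp := hpos p (by simp)
    have hb : (decide (decide (x < 0) < decide (p < 0))) = false := by
      rw [hx, hp]; rfl
    simp only [List.cons_append, PySem.List.insertBy, hb, Bool.false_eq_true, if_false]
    rw [ih (fun y hy => hpos y (List.mem_cons_of_mem p hy))]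

-- inserting a negative element always goes to the end
theorem insertBy_neg (x : Int) (hx : decide (x < 0) = true) (acc : List Int) :
    PySem.List.insertBy (fun a b : Int => decide (decide (a < 0) < decide (b < 0))) x acc
      = acc ++ [x] := by
  apply PySem.List.insertBy_of_forall_not_before
  intro y _
  cases decide (y < 0) <;> simp [hx, Bool.lt_iff]

-- the stable-sort fold keeps the partition invariant: non-negatives first, negatives after
theorem foldl_insertBy_partition (xs pos neg : List Int)
    (hpos : ∀ y ∈ pos, decide (y < 0) = false)
    (hneg : ∀ y ∈ neg, decide (y < 0) = true) :
    xs.foldl (fun acc x =>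
        PySem.List.insertBy (fun a b : Int => decide (decide (a < 0) < decide (b < 0))) x acc)
      (pos ++ neg)
      = (pos ++ xs.filter (fun x => !decide (x < 0))) ++ (neg ++ xs.filter (fun x => decide (x < 0))) := by
  induction xs generalizing pos neg with
  | nil => simp
  | cons x xs ih =>
    by_cases hx : x < 0
    · have hx' : decide (x < 0) = true := by simpa using hx
      have hneg' : ∀ y ∈ neg ++ [x], decide (y < 0) = true := by
        intro y hy
        rcases List.mem_append.1 hy with h | h
        · exact hneg y h
        · rw [List.mem_singleton] at h; rw [h]; exact hx'
      simp only [List.foldl_cons, insertBy_neg x hx' (pos ++ neg)]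
      rw [List.append_assoc pos neg [x], ih pos (neg ++ [x]) hpos hneg']
      simp [hx]
    · have hx' : decide (x < 0) = false := by simpa using hx
      have hpos' : ∀ y ∈ pos ++ [x], decide (y < 0) = false := by
        intro y hy
        rcases List.mem_append.1 hy with h | h
        · exact hpos y h
        · rw [List.mem_singleton] at h; rw [h]; exact hx'
      simp only [List.foldl_cons, insertBy_pos x hx' pos neg hpos hneg]
      have : pos ++ x :: neg = (pos ++ [x]) ++ neg := by simp
      rw [this, ih (pos ++ [x]) neg hpos' hneg]
      simp [hx]

-- A's partition fold, component-wise
theorem foldA_eq (xs : List Int) :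
    xs.foldl (fun (pn : List Int × List Int) x =>
        if x < 0 then (pn.1, pn.2 ++ [x]) else (pn.1 ++ [x], pn.2)) ([], [])
      = (xs.filter (fun x => !decide (x < 0)), xs.filter (fun x => decide (x < 0))) := by
  have hstep : (fun (pn : List Int × List Int) x =>
      if x < 0 then (pn.1, pn.2 ++ [x]) else (pn.1 ++ [x], pn.2))
      = (fun (pn : List Int × List Int) x =>
        ((if !decide (x < 0) then pn.1 ++ [x] else pn.1),
         (if decide (x < 0) then pn.2 ++ [x] else pn.2))) := by
    funext pn x
    by_cases hx : x < 0 <;> simp [hx]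
  rw [hstep,
    PySem.List.foldl_prod_mk
      (f := fun (l : List Int) x => if (!decide (x < 0)) = true then l ++ [x] else l)
      (g := fun (l : List Int) x => if (decide (x < 0)) = true then l ++ [x] else l)]
  have h1 := PySem.List.foldl_append_if (fun x : Int => !decide (x < 0)) id xs []
  have h2 := PySem.List.foldl_append_if (fun x : Int => decide (x < 0)) id xs []
  simp only [id_eq, List.nil_append, List.map_id] at h1 h2
  rw [h1, h2]

-- ===== VERDICT (by name: the statement is the Claim_ definition above) =====
theorem segregateElements_spec : Claim_equal_segregateElements := by
  intro arr n _ _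
  unfold Spec_segregateElements segregateElements segregateElements_alt
  rw [PySem.List.sorted_eq_foldl_insertBy]
  have hB := foldl_insertBy_partition
    ((PySem.List.pyRange 0 n 1).map (fun i => (PySem.List.pyGet? arr i).getD 0)) [] []
    (by intro y h; simp at h) (by intro y h; simp at h)
  simp only [List.nil_append] at hB
  have hA2 := List.foldl_map (f := fun i => (PySem.List.pyGet? arr i).getD 0)
    (g := fun (pn : List Int × List Int) x =>
      if x < 0 then (pn.1, pn.2 ++ [x]) else (pn.1 ++ [x], pn.2))
    (l := PySem.List.pyRange 0 n 1) (init := (([], []) : List Int × List Int))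
  simp only [← hA2, foldA_eq, hB]
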